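-- pv_equiv track=rewrite | github.com/OpenKodaAI/koda | koda/control_plane/agent_spec.py | merge_hierarchical_documents
-- ===== SOURCE A (Python) =====
-- from typing import Any
--
-- _AGENT_DOCUMENT_LAYOUT: tuple[tuple[str, str], ...] = (
--     ("identity_md", "agent_identity"),
--     ("soul_md", "agent_interaction_style"),
--     ("system_prompt_md", "agent_response_policy"),
--     ("instructions_md", "agent_operating_instructions"),
--     ("rules_md", "agent_hard_rules"),
-- )
--
-- def _safe_json_object(value: Any) -> dict[str, Any]:
--     return value if isinstance(value, dict) else {}
--
-- def _trimmed(value: Any) -> str: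
--     return str(value or "").strip()
--
-- def merge_hierarchical_documents(
--     workspace_documents: dict[str, str] | None,
--     squad_documents: dict[str, str] | None,
--     agent_documents: dict[str, str],
-- ) -> dict[str, str]:
--     """Merge documents from all levels with origin markers.
--
--     For each document kind in ``_AGENT_DOCUMENT_LAYOUT``, the content from each
--     level is concatenated with origin headers.  Free documents are included with
--     a namespace prefix.
--     """
--     merged: dict[str, str] = {}
--     ws_docs = _safe_json_object(workspace_documents) if workspace_documents else {}
--     sq_docs = _safe_json_object(squad_documents) if squad_documents else {}
--     ag_docs = _safe_json_object(agent_documents)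
--
--     layout_kinds = {kind for kind, _ in _AGENT_DOCUMENT_LAYOUT}
--     all_kinds = set(ag_docs.keys()) | set(ws_docs.keys()) | set(sq_docs.keys())
--
--     for kind in all_kinds:
--         parts: list[str] = []
--         ws_content = _trimmed(ws_docs.get(kind))
--         sq_content = _trimmed(sq_docs.get(kind))
--         ag_content = _trimmed(ag_docs.get(kind))
--
--         if kind in layout_kinds:
--             # Prompt-affecting documents: concatenate with origin markers
--             if ws_content:
--                 parts.append(f"<!-- origin:workspace -->\n{ws_content}")
--             if sq_content:
--                 parts.append(f"<!-- origin:squad -->\n{sq_content}")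
--             if ag_content:
--                 parts.append(f"<!-- origin:agent -->\n{ag_content}")
--         else:
--             # Non-layout documents: simple concatenation
--             if ws_content:
--                 parts.append(ws_content)
--             if sq_content:
--                 parts.append(sq_content)
--             if ag_content:
--                 parts.append(ag_content)
--
--         if parts:
--             merged[kind] = "\n\n".join(parts)
--
--     return merged
-- ===== SOURCE B (Python) =====
-- _AGENT_DOCUMENT_LAYOUT = (
--     ("identity_md", "agent_identity"),
--     ("soul_md", "agent_interaction_style"),
--     ("system_prompt_md", "agent_response_policy"),
--     ("instructions_md", "agent_operating_instructions"),
--     ("rules_md", "agent_hard_rules"),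
-- )
--
--
-- def merge_hierarchical_documents(workspace_documents, squad_documents, agent_documents):
--     layout_kinds = {kind for kind, _ in _AGENT_DOCUMENT_LAYOUT}
--     ws = workspace_documents or {}
--     sq = squad_documents or {}
--     parts = {}
--     for src, label in ((ws, "workspace"), (sq, "squad"), (agent_documents, "agent")):
--         for kind, value in src.items():
--             content = str(value or "").strip()
--             if content:
--                 text = f"<!-- origin:{label} -->\n{content}" if kind in layout_kinds else content
--                 parts.setdefault(kind, []).append(text)
--     order = dict.fromkeys([*ws, *sq, *agent_documents])
--     return {kind: "\n\n".join(parts[kind]) for kind in order if parts.get(kind)}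
-- ===== Notes on version B (the rewrite author's own statement) =====
-- stated objective: alternative
-- what changed: Inverts the traversal: instead of iterating kinds and probing each level dict per kind, B iterates the three source levels in workspace-squad-agent order once, accumulating per-kind part lists in a dict, then joins them in first-appearance key order.
import Mathlib
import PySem

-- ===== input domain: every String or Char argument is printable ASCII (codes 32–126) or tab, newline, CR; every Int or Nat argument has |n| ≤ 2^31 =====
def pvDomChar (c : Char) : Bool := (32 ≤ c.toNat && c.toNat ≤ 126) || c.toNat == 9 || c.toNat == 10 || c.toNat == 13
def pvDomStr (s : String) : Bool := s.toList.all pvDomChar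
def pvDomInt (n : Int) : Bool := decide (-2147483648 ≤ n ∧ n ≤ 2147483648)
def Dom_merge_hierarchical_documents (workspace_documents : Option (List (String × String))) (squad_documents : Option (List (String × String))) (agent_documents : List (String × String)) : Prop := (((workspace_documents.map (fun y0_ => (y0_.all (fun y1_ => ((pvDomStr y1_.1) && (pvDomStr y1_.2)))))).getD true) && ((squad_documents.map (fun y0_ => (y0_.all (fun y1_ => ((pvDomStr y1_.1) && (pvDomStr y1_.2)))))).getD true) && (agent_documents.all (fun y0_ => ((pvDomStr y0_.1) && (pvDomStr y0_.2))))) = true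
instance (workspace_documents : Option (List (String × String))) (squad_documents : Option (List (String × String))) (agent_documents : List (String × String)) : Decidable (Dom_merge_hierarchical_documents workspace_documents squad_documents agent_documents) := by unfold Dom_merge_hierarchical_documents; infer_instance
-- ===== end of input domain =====

-- B replaces A's kind-outer loop (probing every level dict per kind) by a single source-outer pass
-- accumulating per-kind part lists in a dict, joined in first-appearance key order (objective: alternative).
-- NOTE: A iterates a Python *set* of kinds, whose iteration order CPython leaves unspecified; both ports fix
-- the first-appearance order workspace → squad → agent (dict outputs are compared ignoring order).

-- ===== PORT A =====
def pvLayoutKinds : List String :=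
  ["identity_md", "soul_md", "system_prompt_md", "instructions_md", "rules_md"]

-- _trimmed(d.get(kind)): str(None or "") = "", str(s or "") = s for a str s; then .strip()
def pvTrim (v : Option String) : String := PySem.Str.strip (v.getD "")

-- the per-kind body of A's loop: build `parts` with the six conditional appends
def pvPartsA (layout : PySem.Set String) (ws sq ag : PySem.Dict String String) (kind : String) :
    List String :=
  let ws_content := pvTrim (ws.get? kind)
  let sq_content := pvTrim (sq.get? kind)
  let ag_content := pvTrim (ag.get? kind)
  let parts : List String := []
  if kind ∈ layout then
    let parts := if ws_content ≠ "" then parts ++ ["<!-- origin:workspace -->\n" ++ ws_content] else parts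
    let parts := if sq_content ≠ "" then parts ++ ["<!-- origin:squad -->\n" ++ sq_content] else parts
    if ag_content ≠ "" then parts ++ ["<!-- origin:agent -->\n" ++ ag_content] else parts
  else
    let parts := if ws_content ≠ "" then parts ++ [ws_content] else parts
    let parts := if sq_content ≠ "" then parts ++ [sq_content] else parts
    if ag_content ≠ "" then parts ++ [ag_content] else parts

def merge_hierarchical_documents (workspace_documents : Option (List (String × String))) (squad_documents : Option (List (String × String))) (agent_documents : List (String × String)) : List (String × String) :=
  let ws_docs : PySem.Dict String String :=
    match workspace_documents with
    | some l => PySem.Dict.ofList l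
    | none => PySem.Dict.empty
  let sq_docs : PySem.Dict String String :=
    match squad_documents with
    | some l => PySem.Dict.ofList l
    | none => PySem.Dict.empty
  let ag_docs : PySem.Dict String String := PySem.Dict.ofList agent_documents
  let layout_kinds : PySem.Set String := PySem.Set.ofList pvLayoutKinds
  -- set(ag)|set(ws)|set(sq): CPython set order is unspecified; fixed as first appearance ws → sq → ag
  let all_kinds : PySem.Set String :=
    PySem.Set.ofList (ws_docs.keys ++ sq_docs.keys ++ ag_docs.keys)
  (all_kinds.foldl (fun merged kind =>
      let parts := pvPartsA layout_kinds ws_docs sq_docs ag_docs kind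
      if parts ≠ [] then merged.insert kind (PySem.Str.join "\n\n" parts) else merged)
    PySem.Dict.empty).items

-- ===== PORT B =====
-- f"<!-- origin:{label} -->\n{content}" if kind in layout_kinds else content
def pvMark (layout : PySem.Set String) (label kind content : String) : String :=
  if kind ∈ layout then "<!-- origin:" ++ label ++ " -->\n" ++ content else content

def merge_hierarchical_documents_alt (workspace_documents : Option (List (String × String))) (squad_documents : Option (List (String × String))) (agent_documents : List (String × String)) : List (String × String) :=
  let layout_kinds : PySem.Set String := PySem.Set.ofList pvLayoutKinds
  let ws : PySem.Dict String String :=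
    match workspace_documents with
    | some l => PySem.Dict.ofList l
    | none => PySem.Dict.empty
  let sq : PySem.Dict String String :=
    match squad_documents with
    | some l => PySem.Dict.ofList l
    | none => PySem.Dict.empty
  let ag : PySem.Dict String String := PySem.Dict.ofList agent_documents
  -- parts.setdefault(kind, []).append(text)  =  modify kind [] (· ++ [text])
  let parts : PySem.Dict String (List String) :=
    [(ws, "workspace"), (sq, "squad"), (ag, "agent")].foldl
      (fun parts src =>
        src.1.items.foldl
          (fun parts q =>
            let content := PySem.Str.strip q.2
            if content = "" then parts
            else parts.modify q.1 [] (· ++ [pvMark layout_kinds src.2 q.1 content]))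
          parts)
      PySem.Dict.empty
  let order : List String := PySem.List.dedup (ws.keys ++ sq.keys ++ ag.keys)
  -- {kind: "\n\n".join(parts[kind]) for kind in order if parts.get(kind)}
  (order.foldl (fun merged kind =>
      let ps := parts.getD kind []
      if ps ≠ [] then merged.insert kind (PySem.Str.join "\n\n" ps) else merged)
    PySem.Dict.empty).items

-- ===== PRECONDITION & SPEC =====
def Spec_merge_hierarchical_documents (workspace_documents : Option (List (String × String))) (squad_documents : Option (List (String × String))) (agent_documents : List (String × String)) (out : List (String × String)) : Prop := out = merge_hierarchical_documents_alt workspace_documents squad_documents agent_documents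
instance (workspace_documents : Option (List (String × String))) (squad_documents : Option (List (String × String))) (agent_documents : List (String × String)) (out : List (String × String)) : Decidable (Spec_merge_hierarchical_documents workspace_documents squad_documents agent_documents out) := by unfold Spec_merge_hierarchical_documents; infer_instance

-- ===== CLAIM (what is proved, stated in full; the proofs are below) =====
def Claim_equal_merge_hierarchical_documents : Prop := ∀ (workspace_documents : Option (List (String × String))) (squad_documents : Option (List (String × String))) (agent_documents : List (String × String)), Dom_merge_hierarchical_documents workspace_documents squad_documents agent_documents → Spec_merge_hierarchical_documents workspace_documents squad_documents agent_documents (merge_hierarchical_documents workspace_documents squad_documents agent_documents)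

-- ===== LEMMAS AND PROOFS =====

-- the output-building fold shared by both ports: conditional inserts over fresh distinct keys append
theorem pv_items_out_fold (ks : List String) (vals : String → List String)
    (d : PySem.Dict String String) (hnd : ks.Nodup)
    (hfresh : ∀ k ∈ ks, d.contains k = false) :
    (ks.foldl (fun m k =>
        if vals k ≠ [] then m.insert k (PySem.Str.join "\n\n" (vals k)) else m) d).items
      = d.items ++ ks.filterMap (fun k =>
          if vals k ≠ [] then some (k, PySem.Str.join "\n\n" (vals k)) else none) := by
  induction ks generalizing d with
  | nil => simp
  | cons k t ih =>
    have hk : d.contains k = false := hfresh k (List.mem_cons_self ..)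
    have hnd' : t.Nodup := hnd.of_cons
    have hkt : k ∉ t := (List.nodup_cons.mp hnd).1
    simp only [List.foldl_cons, List.filterMap_cons]
    by_cases hc : vals k ≠ []
    · rw [if_pos hc, if_pos hc, ih _ hnd'
        (by intro k' hk'; rw [PySem.Dict.contains_insert]
            have : k' ≠ k := fun h => hkt (h ▸ hk')
            simp [this, hfresh k' (List.mem_cons_of_mem _ hk')]),
        PySem.Dict.items_insert_of_not_contains _ _ hk]
      simp
    · rw [if_neg hc, if_neg hc, ih _ hnd' (fun k' hk' => hfresh k' (List.mem_cons_of_mem _ hk'))]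

-- B's inner source loop, characterised by per-key lookup
theorem pv_getD_src_fold (l : List (String × String)) (g : String → String → String)
    (d : PySem.Dict String (List String)) (c : String) :
    (l.foldl (fun parts q =>
        if PySem.Str.strip q.2 = "" then parts
        else parts.modify q.1 [] (· ++ [g q.1 (PySem.Str.strip q.2)])) d).getD c []
      = d.getD c [] ++ l.filterMap (fun q =>
          if q.1 = c ∧ PySem.Str.strip q.2 ≠ "" then some (g q.1 (PySem.Str.strip q.2)) else none) := by
  induction l generalizing d with
  | nil => simp
  | cons q t ih =>
    simp only [List.foldl_cons, List.filterMap_cons]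
    by_cases hs : PySem.Str.strip q.2 = ""
    · rw [if_pos hs, ih]
      simp [hs]
    · rw [if_neg hs, ih]
      simp only [PySem.Dict.getD_modify]
      by_cases hq : q.1 = c
      · simp [hq, hs, List.append_assoc]
      · have hq' : c ≠ q.1 := fun h => hq h.symm
        simp [hq, hq', hs]

-- picking the unique hit in a filterMap over a Nodup list
theorem pv_filterMap_if_eq {α : Type} (ks : List String) (hnd : ks.Nodup) (c : String)
    (f : String → Option α) :
    ks.filterMap (fun k => if k = c then f k else none)
      = if c ∈ ks then (f c).toList else [] := by
  induction ks with
  | nil => simp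
  | cons k t ih =>
    by_cases hk : k = c
    · subst hk
      have hkt : k ∉ t := (List.nodup_cons.mp hnd).1
      have ht : t.filterMap (fun x => if x = k then f x else none) = [] := by
        rw [List.filterMap_eq_nil_iff]
        intro a ha
        rw [if_neg (ne_of_mem_of_not_mem ha hkt)]
      cases h : f k <;> simp [h, ht]
    · have hne : c ≠ k := fun h => hk h.symm
      simp [hk, hne, ih hnd.of_cons]

-- one source's filterMap contribution equals A's get?-probe of that source
theorem pv_src_contrib (d : PySem.Dict String String) (hnd : d.keys.Nodup)
    (g : String → String → String) (c : String) :
    d.items.filterMap (fun q =>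
        if q.1 = c ∧ PySem.Str.strip q.2 ≠ "" then some (g q.1 (PySem.Str.strip q.2)) else none)
      = (if pvTrim (d.get? c) ≠ "" then [g c (pvTrim (d.get? c))] else []) := by
  rw [PySem.Dict.items_eq_map_keys d hnd "", List.filterMap_map]
  have hcomp : ((fun q : String × String =>
      if q.1 = c ∧ PySem.Str.strip q.2 ≠ "" then some (g q.1 (PySem.Str.strip q.2)) else none)
        ∘ fun k => (k, d.getD k ""))
      = fun k => if k = c then
          (if PySem.Str.strip (d.getD k "") ≠ "" then some (g k (PySem.Str.strip (d.getD k ""))) else none)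
        else none := by
    funext k
    by_cases hk : k = c <;> simp [Function.comp, hk]
  rw [hcomp, pv_filterMap_if_eq _ hnd]
  by_cases hc : c ∈ d.keys
  · have hsome : d.get? c ≠ none := by
      rw [Ne, PySem.Dict.get?_eq_none_iff_not_mem_keys]; simpa using hc
    rcases h : d.get? c with _ | v
    · exact absurd h hsome
    · have hget : d.getD c "" = v := by rw [PySem.Dict.getD_eq_get?_getD, h]; rfl
      simp only [hc, if_pos, pvTrim, hget, Option.getD_some]
      by_cases hv : PySem.Str.strip v = "" <;> simp [hv]
  · have hnone : d.get? c = none := by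
      rw [PySem.Dict.get?_eq_none_iff_not_mem_keys]; simpa using hc
    have : pvTrim (d.get? c) = "" := by
      rw [hnone]; decide
    simp [hc, this]

-- per-kind agreement: B's accumulated part list equals A's probe-built part list
theorem pv_parts_agree (layout : PySem.Set String) (ws sq ag : PySem.Dict String String)
    (hws : ws.keys.Nodup) (hsq : sq.keys.Nodup) (hag : ag.keys.Nodup) (k : String) :
    ([(ws, "workspace"), (sq, "squad"), (ag, "agent")].foldl
      (fun parts (src : PySem.Dict String String × String) =>
        src.1.items.foldl
          (fun parts q =>
            if PySem.Str.strip q.2 = "" then parts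
            else parts.modify q.1 [] (· ++ [pvMark layout src.2 q.1 (PySem.Str.strip q.2)]))
          parts)
      PySem.Dict.empty).getD k []
      = pvPartsA layout ws sq ag k := by
  simp only [List.foldl_cons, List.foldl_nil]
  rw [pv_getD_src_fold, pv_getD_src_fold, pv_getD_src_fold,
    pv_src_contrib ws hws, pv_src_contrib sq hsq, pv_src_contrib ag hag]
  simp only [PySem.Dict.getD_empty, List.nil_append]
  unfold pvPartsA pvMark
  by_cases hl : k ∈ layout <;>
    by_cases h1 : pvTrim (ws.get? k) = "" <;>
    by_cases h2 : pvTrim (sq.get? k) = "" <;>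
    by_cases h3 : pvTrim (ag.get? k) = "" <;>
    simp [hl, h1, h2, h3]

theorem pv_merge_core (ws sq ag : PySem.Dict String String)
    (hws : ws.keys.Nodup) (hsq : sq.keys.Nodup) (hag : ag.keys.Nodup) :
    ((PySem.Set.ofList (ws.keys ++ sq.keys ++ ag.keys)).foldl (fun merged kind =>
        if pvPartsA (PySem.Set.ofList pvLayoutKinds) ws sq ag kind ≠ [] then
          merged.insert kind (PySem.Str.join "\n\n"
            (pvPartsA (PySem.Set.ofList pvLayoutKinds) ws sq ag kind))
        else merged) PySem.Dict.empty).items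
      = ((PySem.List.dedup (ws.keys ++ sq.keys ++ ag.keys)).foldl (fun merged kind =>
          if ([(ws, "workspace"), (sq, "squad"), (ag, "agent")].foldl
              (fun parts (src : PySem.Dict String String × String) =>
                src.1.items.foldl
                  (fun parts q =>
                    if PySem.Str.strip q.2 = "" then parts
                    else parts.modify q.1 []
                      (· ++ [pvMark (PySem.Set.ofList pvLayoutKinds) src.2 q.1 (PySem.Str.strip q.2)]))
                  parts)
              PySem.Dict.empty).getD kind [] ≠ [] then
            merged.insert kind (PySem.Str.join "\n\n"
              (([(ws, "workspace"), (sq, "squad"), (ag, "agent")].foldl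
                (fun parts (src : PySem.Dict String String × String) =>
                  src.1.items.foldl
                    (fun parts q =>
                      if PySem.Str.strip q.2 = "" then parts
                      else parts.modify q.1 []
                        (· ++ [pvMark (PySem.Set.ofList pvLayoutKinds) src.2 q.1 (PySem.Str.strip q.2)]))
                    parts)
                PySem.Dict.empty).getD kind []))
          else merged) PySem.Dict.empty).items := by
  rw [PySem.List.dedup_eq_ofList]
  rw [pv_items_out_fold _ _ _ (PySem.Set.nodup_ofList _) (by intro k _; rfl),
      pv_items_out_fold _ _ _ (PySem.Set.nodup_ofList _) (by intro k _; rfl)]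
  congr 1
  apply List.filterMap_congr
  intro k _
  rw [pv_parts_agree (PySem.Set.ofList pvLayoutKinds) ws sq ag hws hsq hag k]

theorem merge_equal (workspace_documents : Option (List (String × String)))
    (squad_documents : Option (List (String × String)))
    (agent_documents : List (String × String)) :
    merge_hierarchical_documents workspace_documents squad_documents agent_documents
      = merge_hierarchical_documents_alt workspace_documents squad_documents agent_documents := by
  unfold merge_hierarchical_documents merge_hierarchical_documents_alt
  cases workspace_documents <;> cases squad_documents <;>
    exact pv_merge_core _ _ _
      (by first | exact PySem.Dict.nodup_keys_ofList _ | exact PySem.Dict.nodup_keys_empty)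
      (by first | exact PySem.Dict.nodup_keys_ofList _ | exact PySem.Dict.nodup_keys_empty)
      (PySem.Dict.nodup_keys_ofList _)

-- ===== VERDICT (by name: the statement is the Claim_ definition above) =====
theorem merge_hierarchical_documents_spec : Claim_equal_merge_hierarchical_documents := by
  intro w s a _
  unfold Spec_merge_hierarchical_documents
  exact merge_equal w s a
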